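-- pv_equiv track=rewrite | github.com/cantsaydorifto/leet-py | slidingWindow/countSubstringsWithKfrequency.py | numberOfSubstringsN2
-- ===== SOURCE A (Python) =====
-- def numberOfSubstringsN2(s: str, k: int) -> int:
--     res = 0
--     for i in range(len(s)):
--         count = [0] * 26
--         for j in range(i, len(s)):
--             count[ord(s[j]) - ord("a")] += 1
--             if count[ord(s[j]) - ord("a")] == k:
--                 res += len(s) - 1 - j + 1
--                 break
--     return res
-- ===== SOURCE B (Python) =====
-- def numberOfSubstringsN2(s: str, k: int) -> int:
--     # Sliding window: for each right end r, grow the window and shrink from the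
--     # left while some character count reaches k; every start left of the window
--     # gives a valid substring ending at r.
--     count = [0] * 26
--     res = 0
--     l = 0
--     for r in range(len(s)):
--         x = ord(s[r]) - ord("a")
--         count[x] += 1
--         while count[x] == k:
--             count[ord(s[l]) - ord("a")] -= 1
--             l += 1
--         res += l
--     return res
-- ===== Notes on version B (the rewrite author's own statement) =====
-- stated objective: faster
-- what changed: Replaced the O(n^2) per-start rescan (inner loop with a fresh 26-counter and break) by a single monotonic two-pointer sliding window that maintains one running counter and adds the number of valid starts per right end.
import Mathlib
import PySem

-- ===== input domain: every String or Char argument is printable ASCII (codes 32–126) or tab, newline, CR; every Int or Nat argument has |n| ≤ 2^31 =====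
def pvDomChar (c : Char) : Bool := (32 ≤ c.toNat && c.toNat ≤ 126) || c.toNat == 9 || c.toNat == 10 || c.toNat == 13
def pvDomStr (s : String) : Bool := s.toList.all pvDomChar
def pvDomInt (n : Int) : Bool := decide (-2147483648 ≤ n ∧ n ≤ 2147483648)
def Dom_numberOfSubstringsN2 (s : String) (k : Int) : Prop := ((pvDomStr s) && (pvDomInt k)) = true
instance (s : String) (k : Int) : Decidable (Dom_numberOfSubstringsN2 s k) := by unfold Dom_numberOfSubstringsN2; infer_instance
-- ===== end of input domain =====

-- B replaces A's quadratic per-start rescan by a one-pass two-pointer sliding window (objective: faster).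

-- ===== PORT A =====
-- inner loop: 'for j in range(i, len(s)): count[ord(s[j])-97] += 1; if count[...] == k: res += len(s)-1-j+1; break'
-- (count[idx] += 1 is get-then-set via PySem.List.pyGetD/pySetD, exact — including Python's
--  negative-index wraparound — whenever -26 ≤ idx < 26, which Pre_ guarantees)
def pvInnerA (k : Int) (n : Nat) : List Char → Nat → List Int → Int → Int
  | [], _, _, res => res
  | c :: rest, j, count, res =>
    let idx : Int := (c.toNat : Int) - 97
    let count' := PySem.List.pySetD count idx (PySem.List.pyGetD count idx 0 + 1)
    if PySem.List.pyGetD count' idx 0 = k then res + ((n : Int) - 1 - (j : Int) + 1)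
    else pvInnerA k n rest (j + 1) count' res

def numberOfSubstringsN2 (s : String) (k : Int) : Int :=
  let cs := s.toList
  let n := cs.length
  (List.range n).foldl (fun res i => pvInnerA k n (cs.drop i) i (List.replicate 26 0) res) 0

-- ===== PORT B =====
-- 'while count[x] == k: count[ord(s[l])-97] -= 1; l += 1' — the fuel r+1-l bounds the Python
-- loop exactly (the condition needs an occurrence of s[r]'s slot inside the window [l, r],
-- so the loop body runs at most r+1-l times)
def pvShrink (k : Int) (cs : List Char) (x : Int) : Nat → List Int → Nat → List Int × Nat
  | 0, count, l => (count, l)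
  | fuel + 1, count, l =>
    if PySem.List.pyGetD count x 0 = k then
      let c := cs.getD l 'a'
      let idx : Int := (c.toNat : Int) - 97
      pvShrink k cs x fuel (PySem.List.pySetD count idx (PySem.List.pyGetD count idx 0 - 1)) (l + 1)
    else (count, l)

-- body of 'for r in range(len(s))': add s[r] to the window, shrink it, res += l
def pvStepB (k : Int) (cs : List Char) (st : List Int × Nat × Int) (r : Nat) : List Int × Nat × Int :=
  let c := cs.getD r 'a'
  let x : Int := (c.toNat : Int) - 97
  let count1 := PySem.List.pySetD st.1 x (PySem.List.pyGetD st.1 x 0 + 1)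
  let p := pvShrink k cs x (r + 1 - st.2.1) count1 st.2.1
  (p.1, p.2, st.2.2 + (p.2 : Int))

def numberOfSubstringsN2_alt (s : String) (k : Int) : Int :=
  let cs := s.toList
  ((List.range cs.length).foldl (pvStepB k cs) (List.replicate 26 0, 0, 0)).2.2

-- ===== PRECONDITION & SPEC =====
-- Pre_ excludes exactly the strings on which BOTH Pythons raise IndexError: a char c with
-- ord(c) outside [71,122] makes the index ord(c)-97 fall outside [-26,26) of the 26-slot list.
def Pre_numberOfSubstringsN2 (s : String) (k : Int) : Prop :=
  (s.toList.all (fun c => 71 ≤ c.toNat && c.toNat ≤ 122)) = true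
instance (s : String) (k : Int) : Decidable (Pre_numberOfSubstringsN2 s k) := by
  unfold Pre_numberOfSubstringsN2; infer_instance

def pvWitness_numberOfSubstringsN2 : String × Int := ("abcab", 2)

def Spec_numberOfSubstringsN2 (s : String) (k : Int) (out : Int) : Prop := out = numberOfSubstringsN2_alt s k
instance (s : String) (k : Int) (out : Int) : Decidable (Spec_numberOfSubstringsN2 s k out) := by unfold Spec_numberOfSubstringsN2; infer_instance

-- ===== CLAIM (what is proved, stated in full; the proofs are below) =====
def Claim_equal_numberOfSubstringsN2 : Prop := ∀ (s : String) (k : Int), Dom_numberOfSubstringsN2 s k → Pre_numberOfSubstringsN2 s k → Spec_numberOfSubstringsN2 s k (numberOfSubstringsN2 s k)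

-- ===== LEMMAS AND PROOFS =====

-- effective slot of character c in the 26-slot counter (Python wraps a negative index)
def pvE (c : Char) : Nat := (c.toNat - 71) % 26
-- the counter list determined by a window w of slots
def pvCl (w : List Nat) : List Int := (List.range 26).map (fun v => ((w.count v : Nat) : Int))
-- the window of slots [i, j) of t
def pvSeg (t : List Nat) (i j : Nat) : List Nat := (t.take j).drop i
-- "some slot occurs at least k times in u"
def pvOk (k : Int) (u : List Nat) : Bool := u.any (fun v => decide (k ≤ ((u.count v : Nat) : Int)))
-- "the substring given by window [i, j) of t is valid"
def pvV (k : Int) (t : List Nat) (i j : Nat) : Bool := pvOk k (pvSeg t i j)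

lemma pvE_lt (c : Char) : pvE c < 26 := Nat.mod_lt _ (by norm_num)

lemma pv_idx_bridge (c : Char) (h1 : 71 ≤ c.toNat) (h2 : c.toNat ≤ 122) :
    PySem.List.pyIdx? 26 ((c.toNat : Int) - 97) = some (pvE c) := by
  unfold pvE
  simp only [PySem.List.pyIdx?]
  split_ifs with ha hb hc <;> simp_all <;> omega

lemma pv_len_cl (w : List Nat) : (pvCl w).length = 26 := by simp [pvCl]

lemma pv_getD_bridge (w : List Nat) (c : Char) (h1 : 71 ≤ c.toNat) (h2 : c.toNat ≤ 122) (d : Int) :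
    PySem.List.pyGetD (pvCl w) ((c.toNat : Int) - 97) d = ((w.count (pvE c) : Nat) : Int) := by
  have h := pvE_lt c
  simp only [PySem.List.pyGetD, PySem.List.pyGet?, pv_len_cl, pv_idx_bridge c h1 h2]
  simp [pvCl, List.getElem?_map, h]

lemma pv_setD_bridge (w : List Nat) (c : Char) (h1 : 71 ≤ c.toNat) (h2 : c.toNat ≤ 122) (v : Int) :
    PySem.List.pySetD (pvCl w) ((c.toNat : Int) - 97) v = (pvCl w).set (pvE c) v := by
  simp only [PySem.List.pySetD, PySem.List.pySet?, pv_len_cl, pv_idx_bridge c h1 h2]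
  rfl

lemma pv_cl_snoc (w : List Nat) (e : Nat) (he : e < 26) :
    (pvCl w).set e (((w.count e : Nat) : Int) + 1) = pvCl (w ++ [e]) := by
  refine List.ext_getElem (by simp [pvCl]) ?_
  intro i hi hi'
  have hi26 : i < 26 := by simpa [pvCl] using hi'
  rcases eq_or_ne i e with rfl | hne
  · simp [pvCl, List.getElem_set, List.count_append]
  · simp [pvCl, List.getElem_set, hne, List.count_append, List.count_singleton, Ne.symm hne, hi26]

lemma pv_cl_tail (w : List Nat) (e : Nat) (he : e < 26) :
    (pvCl (e :: w)).set e ((((e :: w).count e : Nat) : Int) - 1) = pvCl w := by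
  refine List.ext_getElem (by simp [pvCl]) ?_
  intro i hi hi'
  have hi26 : i < 26 := by simpa [pvCl] using hi'
  rcases eq_or_ne i e with rfl | hne
  · simp [pvCl, List.getElem_set, List.count_cons]
  · simp [pvCl, List.getElem_set, hne, List.count_cons, Ne.symm hne, hi26]

lemma pv_cl_nil : List.replicate 26 (0:Int) = pvCl [] := by
  simp [pvCl]

lemma pvSeg_empty (t : List Nat) (i j : Nat) (h : j ≤ i) : pvSeg t i j = [] := by
  apply List.drop_eq_nil_of_le; simpa using by omega

lemma pvSeg_snoc (t : List Nat) (i m : Nat) (hi : i ≤ m) (hm : m < t.length) :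
    pvSeg t i (m + 1) = pvSeg t i m ++ [t[m]] := by
  unfold pvSeg
  rw [List.take_add_one, List.getElem?_eq_getElem hm]
  simp only [Option.toList_some]
  rw [List.drop_append_of_le_length (by simp; omega)]

lemma pvSeg_cons (t : List Nat) (i j : Nat) (hij : i < j) (hi : i < t.length) :
    pvSeg t i j = t[i] :: pvSeg t (i + 1) j := by
  unfold pvSeg
  rw [List.drop_eq_getElem_cons (by simp; omega)]
  simp [hij, hi]

lemma pvSeg_prefix (t : List Nat) (i m j : Nat) (him : i ≤ m) (hmj : m ≤ j) :
    pvSeg t i m <+: pvSeg t i j := by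
  unfold pvSeg
  obtain ⟨u, hu⟩ : t.take m <+: t.take j := List.take_prefix_take_left hmj
  by_cases hle : i ≤ (t.take m).length
  · refine ⟨u, ?_⟩
    rw [← hu, List.drop_append_of_le_length hle]
  · rw [List.drop_eq_nil_of_le (le_of_not_ge hle)]
    exact List.nil_prefix

lemma pvSeg_count_prefix_le (t : List Nat) (i m j : Nat) (him : i ≤ m) (hmj : m ≤ j) (v : Nat) :
    (pvSeg t i m).count v ≤ (pvSeg t i j).count v :=
  (pvSeg_prefix t i m j him hmj).count_le v

lemma pvSeg_count_drop_le (t : List Nat) (i i' j : Nat) (h : i ≤ i') (v : Nat) :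
    (pvSeg t i' j).count v ≤ (pvSeg t i j).count v := by
  unfold pvSeg
  have : (t.take j).drop i' = ((t.take j).drop i).drop (i' - i) := by
    rw [List.drop_drop]; congr 1; omega
  rw [this]
  exact (List.drop_sublist _ _).count_le v

lemma pvOk_false (k : Int) (u : List Nat) (h : ∀ v, ((u.count v : Nat) : Int) < k) : pvOk k u = false := by
  simp only [pvOk, List.any_eq_false]
  intro v _
  simpa using not_le.2 (h v)

lemma pvOk_true (k : Int) (u : List Nat) (v : Nat) (hk : 1 ≤ k) (h : k ≤ ((u.count v : Nat) : Int)) :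
    pvOk k u = true := by
  have hvpos : 0 < u.count v := by
    by_contra hc
    push_neg at hc
    have h0 : u.count v = 0 := by omega
    rw [h0] at h
    norm_num at h
    omega
  refine List.any_eq_true.2 ⟨v, List.count_pos_iff.1 hvpos, by simpa using h⟩

lemma pvOk_mono (k : Int) (u u' : List Nat) (hk : 1 ≤ k) (hp : u <+: u') (h : pvOk k u = true) :
    pvOk k u' = true := by
  obtain ⟨v, hv, hcnt⟩ := List.any_eq_true.1 h
  exact pvOk_true k u' v hk (le_trans (by simpa using hcnt) (by exact_mod_cast hp.count_le v))

lemma pvV_drop_conj (k : Int) (t : List Nat) (i j : Nat) :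
    (decide (i ≤ j) && pvV k t i (j + 1)) = pvV k t i (j + 1) := by
  by_cases h : i ≤ j
  · simp [h]
  · have : pvSeg t i (j + 1) = [] := pvSeg_empty t i (j + 1) (by omega)
    simp [pvV, this, pvOk, h]

lemma pv_countP_ge (n m : Nat) : (List.range n).countP (fun j => decide (m ≤ j)) = n - m := by
  induction n with
  | zero => simp
  | succ n ih =>
    rw [List.range_succ, List.countP_append, ih]
    by_cases h : m ≤ n <;> simp [h] <;> omega

lemma pv_countP_lt (n m : Nat) : (List.range n).countP (fun j => decide (j < m)) = min m n := by
  induction n with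
  | zero => simp
  | succ n ih =>
    rw [List.range_succ, List.countP_append, ih]
    by_cases h : n < m <;> simp [h] <;> omega

lemma pv_countP_int (p : Nat → Bool) (n : Nat) :
    (((List.range n).countP p : Nat) : Int) = ∑ j ∈ Finset.range n, (if p j then (1:Int) else 0) := by
  induction n with
  | zero => simp
  | succ n ih =>
    rw [List.range_succ, List.countP_append, Finset.sum_range_succ, ← ih]
    by_cases h : p n <;> simp [h]

-- ===== A-side: the inner loop counts the valid right ends of window start i =====
lemma pvInnerA_eq (k : Int) (hk : 1 ≤ k) (cs : List Char)
    (hcs : ∀ c ∈ cs, 71 ≤ c.toNat ∧ c.toNat ≤ 122) :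
    ∀ (rest : List Char) (i m : Nat) (res : Int),
      rest = cs.drop m → i ≤ m →
      (∀ v, (((pvSeg (cs.map pvE) i m).count v : Nat) : Int) < k) →
      pvInnerA k cs.length rest m (pvCl (pvSeg (cs.map pvE) i m)) res
        = res + (((List.range cs.length).countP
            (fun j => decide (m ≤ j) && pvV k (cs.map pvE) i (j + 1)) : Nat) : Int) := by
  intro rest
  induction rest with
  | nil =>
    intro i m res hdrop him hcnt
    have hnm : cs.length ≤ m := by
      by_contra hc
      push_neg at hc
      exact absurd (List.drop_eq_nil_iff.1 hdrop.symm) (by omega)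
    have h0 : (List.range cs.length).countP
        (fun j => decide (m ≤ j) && pvV k (cs.map pvE) i (j + 1)) = 0 := by
      apply List.countP_eq_zero.2
      intro j hj
      have : j < cs.length := List.mem_range.1 hj
      simp [show ¬ (m ≤ j) by omega]
    simp [pvInnerA, h0]
  | cons c rest' ih =>
    intro i m res hdrop him hcnt
    have hm : m < cs.length := by
      by_contra hc
      push_neg at hc
      rw [List.drop_eq_nil_of_le hc] at hdrop
      exact absurd hdrop (by simp)
    rw [List.drop_eq_getElem_cons hm] at hdrop
    obtain ⟨hc_eq, hrest'⟩ := List.cons_eq_cons.1 hdrop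
    obtain ⟨h1, h2⟩ := hcs c (hc_eq ▸ cs.getElem_mem hm)
    have htlen : (cs.map pvE).length = cs.length := by simp
    have htm : (cs.map pvE)[m]'(by omega) = pvE c := by simp [← hc_eq]
    have hsnoc : pvSeg (cs.map pvE) i (m + 1) = pvSeg (cs.map pvE) i m ++ [pvE c] := by
      rw [pvSeg_snoc (cs.map pvE) i m him (by omega), htm]
    have hce : (((pvSeg (cs.map pvE) i (m + 1)).count (pvE c) : Nat) : Int)
        = (((pvSeg (cs.map pvE) i m).count (pvE c) : Nat) : Int) + 1 := by
      rw [hsnoc]; push_cast [List.count_append]; simp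
    simp only [pvInnerA]
    rw [pv_setD_bridge _ c h1 h2, pv_getD_bridge _ c h1 h2,
        pv_cl_snoc _ (pvE c) (pvE_lt c), ← hsnoc, pv_getD_bridge _ c h1 h2]
    by_cases hcond : (((pvSeg (cs.map pvE) i (m + 1)).count (pvE c) : Nat) : Int) = k
    · rw [if_pos hcond]
      have hcp : (List.range cs.length).countP
          (fun j => decide (m ≤ j) && pvV k (cs.map pvE) i (j + 1)) = cs.length - m := by
        rw [← pv_countP_ge cs.length m]
        apply List.countP_congr
        intro j hj
        by_cases hmj : m ≤ j
        · have hv : pvV k (cs.map pvE) i (j + 1) = true := by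
            apply pvOk_true k _ (pvE c) hk
            calc k = (((pvSeg (cs.map pvE) i (m + 1)).count (pvE c) : Nat) : Int) := hcond.symm
              _ ≤ (((pvSeg (cs.map pvE) i (j + 1)).count (pvE c) : Nat) : Int) := by
                  exact_mod_cast pvSeg_count_prefix_le (cs.map pvE) i (m + 1) (j + 1)
                    (by omega) (by omega) (pvE c)
          simp [hmj, hv]
        · simp [hmj]
      rw [hcp]
      omega
    · rw [if_neg hcond]
      have hcnt' : ∀ v, (((pvSeg (cs.map pvE) i (m + 1)).count v : Nat) : Int) < k := by
        intro v
        rcases eq_or_ne v (pvE c) with rfl | hne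
        · have := hcnt (pvE c)
          omega
        · rw [hsnoc]
          have : ((pvSeg (cs.map pvE) i m ++ [pvE c]).count v)
              = (pvSeg (cs.map pvE) i m).count v := by
            simp [List.count_append, List.count_singleton, Ne.symm hne]
          rw [this]
          exact hcnt v
      rw [ih i (m + 1) res hrest' (by omega) hcnt']
      congr 2
      apply List.countP_congr
      intro j hj
      by_cases hjm : j = m
      · subst hjm
        have hfalse : pvV k (cs.map pvE) i (j + 1) = false := pvOk_false k _ hcnt'
        simp [hfalse]
      · by_cases hmj : m ≤ j
        · simp [hmj, show m + 1 ≤ j by omega]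
        · simp [hmj, show ¬ (m + 1 ≤ j) by omega]

-- A's total as a sum over window starts
lemma pvA_total (k : Int) (hk : 1 ≤ k) (s : String)
    (hcs : ∀ c ∈ s.toList, 71 ≤ c.toNat ∧ c.toNat ≤ 122) :
    numberOfSubstringsN2 s k
      = ∑ i ∈ Finset.range s.toList.length,
          (((List.range s.toList.length).countP
            (fun j => pvV k (s.toList.map pvE) i (j + 1)) : Nat) : Int) := by
  unfold numberOfSubstringsN2
  have hstep : ∀ (i : Nat) (res : Int),
      pvInnerA k s.toList.length (s.toList.drop i) i (List.replicate 26 0) res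
        = res + (((List.range s.toList.length).countP
            (fun j => pvV k (s.toList.map pvE) i (j + 1)) : Nat) : Int) := by
    intro i res
    have hseg : pvSeg (s.toList.map pvE) i i = [] := pvSeg_empty _ i i le_rfl
    have h := pvInnerA_eq k hk s.toList hcs (s.toList.drop i) i i res rfl le_rfl
      (by rw [hseg]; intro v; simpa using hk)
    rw [hseg, ← pv_cl_nil] at h
    rw [h]
    congr 2
    apply List.countP_congr
    intro j hj
    rw [pvV_drop_conj k (s.toList.map pvE) i j]
  calc (List.range s.toList.length).foldl
        (fun res i => pvInnerA k s.toList.length (s.toList.drop i) i (List.replicate 26 0) res) 0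
      = (List.range s.toList.length).foldl
        (fun res i => res + (((List.range s.toList.length).countP
            (fun j => pvV k (s.toList.map pvE) i (j + 1)) : Nat) : Int)) 0 := by
        congr 1
        funext res i
        exact hstep i res
    _ = 0 + ((List.range s.toList.length).map
          (fun i => (((List.range s.toList.length).countP
            (fun j => pvV k (s.toList.map pvE) i (j + 1)) : Nat) : Int))).sum :=
        PySem.List.foldl_add _ _ _
    _ = _ := by
        rw [zero_add]
        rfl

-- ===== B-side =====
lemma pvShrink_spec (k : Int) (hk : 1 ≤ k) (cs : List Char)
    (hcs : ∀ c ∈ cs, 71 ≤ c.toNat ∧ c.toNat ≤ 122) (r : Nat) (hr : r < cs.length) :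
    ∀ (fuel l : Nat), fuel = r + 1 - l → l ≤ r + 1 →
      (∀ v, v ≠ pvE (cs[r]'hr) →
        (((pvSeg (cs.map pvE) l (r + 1)).count v : Nat) : Int) < k) →
      ((((pvSeg (cs.map pvE) l (r + 1)).count (pvE (cs[r]'hr)) : Nat) : Int) ≤ k) →
      ∃ l2, pvShrink k cs (((cs[r]'hr).toNat : Int) - 97) fuel
              (pvCl (pvSeg (cs.map pvE) l (r + 1))) l
            = (pvCl (pvSeg (cs.map pvE) l2 (r + 1)), l2)
        ∧ l ≤ l2 ∧ l2 ≤ r + 1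
        ∧ (∀ i, l ≤ i → i < l2 → pvV k (cs.map pvE) i (r + 1) = true)
        ∧ (∀ v, (((pvSeg (cs.map pvE) l2 (r + 1)).count v : Nat) : Int) < k) := by
  intro fuel
  induction fuel with
  | zero =>
    intro l hfuel hl hother hself
    have hl' : l = r + 1 := by omega
    subst hl'
    have hseg : pvSeg (cs.map pvE) (r + 1) (r + 1) = [] := pvSeg_empty _ _ _ le_rfl
    refine ⟨r + 1, by simp [pvShrink], le_rfl, le_rfl, by omega, ?_⟩
    intro v
    rw [hseg]
    simpa using hk
  | succ fuel ih =>
    intro l hfuel hl hother hself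
    obtain ⟨h1r, h2r⟩ := hcs (cs[r]'hr) (cs.getElem_mem hr)
    simp only [pvShrink]
    rw [pv_getD_bridge _ (cs[r]'hr) h1r h2r]
    by_cases hcond : (((pvSeg (cs.map pvE) l (r + 1)).count (pvE (cs[r]'hr)) : Nat) : Int) = k
    · rw [if_pos hcond]
      -- window is nonempty: its count of pvE cs[r] is k ≥ 1
      have hpos : 0 < (pvSeg (cs.map pvE) l (r + 1)).count (pvE (cs[r]'hr)) := by omega
      have hlr : l ≤ r := by
        by_contra hc
        push_neg at hc
        rw [pvSeg_empty _ l (r + 1) (by omega)] at hpos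
        simp at hpos
      have hllen : l < cs.length := by omega
      have hgetD : cs.getD l 'a' = cs[l]'hllen := by
        rw [List.getD_eq_getElem?_getD, List.getElem?_eq_getElem hllen]; rfl
      obtain ⟨h1l, h2l⟩ := hcs (cs[l]'hllen) (cs.getElem_mem hllen)
      have htl : (cs.map pvE)[l]'(by simpa using hllen) = pvE (cs[l]'hllen) := by simp
      have hcons : pvSeg (cs.map pvE) l (r + 1)
          = pvE (cs[l]'hllen) :: pvSeg (cs.map pvE) (l + 1) (r + 1) := by
        rw [pvSeg_cons (cs.map pvE) l (r + 1) (by omega) (by simpa using hllen), htl]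
      rw [hgetD, pv_getD_bridge _ (cs[l]'hllen) h1l h2l, pv_setD_bridge _ (cs[l]'hllen) h1l h2l]
      rw [hcons, pv_cl_tail _ (pvE (cs[l]'hllen)) (pvE_lt _)]
      have hother' : ∀ v, v ≠ pvE (cs[r]'hr) →
          (((pvSeg (cs.map pvE) (l + 1) (r + 1)).count v : Nat) : Int) < k := by
        intro v hv
        exact lt_of_le_of_lt
          (by exact_mod_cast pvSeg_count_drop_le (cs.map pvE) l (l + 1) (r + 1) (by omega) v)
          (hother v hv)
      have hself' : (((pvSeg (cs.map pvE) (l + 1) (r + 1)).count (pvE (cs[r]'hr)) : Nat) : Int) ≤ k := by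
        exact le_trans
          (by exact_mod_cast pvSeg_count_drop_le (cs.map pvE) l (l + 1) (r + 1) (by omega) _)
          hself
      obtain ⟨l2, heq, hle2, hub2, hvalid2, hcounts2⟩ :=
        ih (l + 1) (by omega) (by omega) hother' hself'
      refine ⟨l2, heq, by omega, hub2, ?_, hcounts2⟩
      intro i hi1 hi2
      rcases eq_or_ne i l with rfl | hne
      · exact pvOk_true k _ (pvE (cs[r]'hr)) hk (le_of_eq hcond.symm)
      · exact hvalid2 i (by omega) hi2
    · rw [if_neg hcond]
      refine ⟨l, rfl, le_rfl, hl, by omega, ?_⟩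
      intro v
      rcases eq_or_ne v (pvE (cs[r]'hr)) with rfl | hne
      · omega
      · exact hother v hne

lemma pv_getD_char (cs : List Char) (r : Nat) (h : r < cs.length) : cs.getD r 'a' = cs[r] := by
  rw [List.getD_eq_getElem?_getD, List.getElem?_eq_getElem h]; rfl

-- B's loop invariant: after r steps the counter describes the window [l, r), every start
-- left of l is valid for right end r-1, the window itself has all counts < k, and the
-- accumulated result is the sum over processed right ends of the number of valid starts.
lemma pvB_inv (k : Int) (hk : 1 ≤ k) (cs : List Char)
    (hcs : ∀ c ∈ cs, 71 ≤ c.toNat ∧ c.toNat ≤ 122) :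
    ∀ r, r ≤ cs.length →
      ∃ l, (List.range r).foldl (pvStepB k cs) (List.replicate 26 0, 0, 0)
            = (pvCl (pvSeg (cs.map pvE) l r), l,
               ∑ j ∈ Finset.range r,
                 (((List.range cs.length).countP
                   (fun i => pvV k (cs.map pvE) i (j + 1)) : Nat) : Int))
        ∧ l ≤ r
        ∧ (∀ i, i < l → pvV k (cs.map pvE) i r = true)
        ∧ (∀ v, (((pvSeg (cs.map pvE) l r).count v : Nat) : Int) < k) := by
  intro r
  induction r with
  | zero =>
    intro _
    refine ⟨0, ?_, le_rfl, by omega, ?_⟩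
    · rw [pvSeg_empty _ 0 0 le_rfl, ← pv_cl_nil]
      simp
    · intro v
      rw [pvSeg_empty _ 0 0 le_rfl]
      simpa using hk
  | succ r ihr =>
    intro hr1
    have hr : r < cs.length := by omega
    obtain ⟨l, hfold, hlr, hvalid, hcnt⟩ := ihr (by omega)
    rw [List.range_succ, List.foldl_append, hfold]
    obtain ⟨h1r, h2r⟩ := hcs (cs[r]'hr) (cs.getElem_mem hr)
    have htr : (cs.map pvE)[r]'(by simpa using hr) = pvE (cs[r]'hr) := by simp
    have hsnoc : pvSeg (cs.map pvE) l (r + 1)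
        = pvSeg (cs.map pvE) l r ++ [pvE (cs[r]'hr)] := by
      rw [pvSeg_snoc (cs.map pvE) l r hlr (by simpa using hr), htr]
    have hother : ∀ v, v ≠ pvE (cs[r]'hr) →
        (((pvSeg (cs.map pvE) l (r + 1)).count v : Nat) : Int) < k := by
      intro v hv
      rw [hsnoc]
      have : ((pvSeg (cs.map pvE) l r ++ [pvE (cs[r]'hr)]).count v)
          = (pvSeg (cs.map pvE) l r).count v := by
        simp [List.count_append, List.count_singleton, Ne.symm hv]
      rw [this]
      exact hcnt v
    have hself : (((pvSeg (cs.map pvE) l (r + 1)).count (pvE (cs[r]'hr)) : Nat) : Int) ≤ k := by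
      rw [hsnoc, List.count_append]
      have h1 : (List.count (pvE (cs[r]'hr)) [pvE (cs[r]'hr)]) = 1 := by simp
      have := hcnt (pvE (cs[r]'hr))
      push_cast [h1]
      omega
    obtain ⟨l2, heq, hle2, hub2, hvalid2, hcounts2⟩ :=
      pvShrink_spec k hk cs hcs r hr (r + 1 - l) l rfl (by omega) hother hself
    -- evaluate one pvStepB
    have hstep : pvStepB k cs (pvCl (pvSeg (cs.map pvE) l r), l,
          ∑ j ∈ Finset.range r,
            (((List.range cs.length).countP
              (fun i => pvV k (cs.map pvE) i (j + 1)) : Nat) : Int)) r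
        = (pvCl (pvSeg (cs.map pvE) l2 (r + 1)), l2,
           (∑ j ∈ Finset.range r,
             (((List.range cs.length).countP
               (fun i => pvV k (cs.map pvE) i (j + 1)) : Nat) : Int)) + (l2 : Int)) := by
      simp only [pvStepB, pv_getD_char cs r hr]
      rw [pv_setD_bridge _ (cs[r]'hr) h1r h2r, pv_getD_bridge _ (cs[r]'hr) h1r h2r,
          pv_cl_snoc _ (pvE (cs[r]'hr)) (pvE_lt _), ← hsnoc, heq]
    -- every start strictly left of l2 is valid for right end r, nothing else is
    have hpoint : ∀ i, pvV k (cs.map pvE) i (r + 1) = decide (i < l2) := by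
      intro i
      by_cases hi : i < l2
      · rcases lt_or_ge i l with hil | hil
        · have h1 : pvV k (cs.map pvE) i r = true := hvalid i hil
          have h2 : pvV k (cs.map pvE) i (r + 1) = true :=
            pvOk_mono k _ _ hk (pvSeg_prefix (cs.map pvE) i r (r + 1) (by omega) (by omega)) h1
          simp [h2, hi]
        · simp [hvalid2 i hil hi, hi]
      · have hfalse : pvV k (cs.map pvE) i (r + 1) = false := by
          apply pvOk_false
          intro v
          exact lt_of_le_of_lt
            (by exact_mod_cast pvSeg_count_drop_le (cs.map pvE) l2 i (r + 1) (by omega) v)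
            (hcounts2 v)
        simp [hfalse, hi]
    have hl2count : (List.range cs.length).countP
        (fun i => pvV k (cs.map pvE) i (r + 1)) = l2 := by
      have : (List.range cs.length).countP (fun i => pvV k (cs.map pvE) i (r + 1))
          = (List.range cs.length).countP (fun i => decide (i < l2)) :=
        List.countP_congr (fun i _ => by rw [hpoint i])
      rw [this, pv_countP_lt]
      omega
    refine ⟨l2, ?_, by omega, ?_, hcounts2⟩
    · simp only [List.foldl_cons, List.foldl_nil, hstep]
      rw [Finset.sum_range_succ, hl2count]
    · intro i hi
      rw [hpoint i]
      simpa using hi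

-- ===== the degenerate case k ≤ 0: A never breaks, B never shrinks; both return 0 =====
lemma pvInnerA_zero (k : Int) (hk : k ≤ 0) (cs : List Char)
    (hcs : ∀ c ∈ cs, 71 ≤ c.toNat ∧ c.toNat ≤ 122) :
    ∀ (rest : List Char) (m : Nat) (w : List Nat) (res : Int),
      rest = cs.drop m →
      pvInnerA k cs.length rest m (pvCl w) res = res := by
  intro rest
  induction rest with
  | nil => intro m w res _; simp [pvInnerA]
  | cons c rest' ih =>
    intro m w res hdrop
    have hm : m < cs.length := by
      by_contra hc
      push_neg at hc
      rw [List.drop_eq_nil_of_le hc] at hdrop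
      exact absurd hdrop (by simp)
    rw [List.drop_eq_getElem_cons hm] at hdrop
    obtain ⟨hc_eq, hrest'⟩ := List.cons_eq_cons.1 hdrop
    obtain ⟨h1, h2⟩ := hcs c (hc_eq ▸ cs.getElem_mem hm)
    simp only [pvInnerA]
    rw [pv_setD_bridge _ c h1 h2, pv_getD_bridge _ c h1 h2,
        pv_cl_snoc _ (pvE c) (pvE_lt c), pv_getD_bridge _ c h1 h2]
    rw [if_neg (by
      rw [List.count_append]
      have h1 : (List.count (pvE c) [pvE c]) = 1 := by simp
      push_cast [h1]
      omega)]
    exact ih (m + 1) (w ++ [pvE c]) res hrest'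

lemma pvA_zero (k : Int) (hk : k ≤ 0) (s : String)
    (hcs : ∀ c ∈ s.toList, 71 ≤ c.toNat ∧ c.toNat ≤ 122) :
    numberOfSubstringsN2 s k = 0 := by
  unfold numberOfSubstringsN2
  have hgen : ∀ (l : List Nat) (b : Int),
      l.foldl (fun res i => pvInnerA k s.toList.length (s.toList.drop i) i
        (List.replicate 26 0) res) b = b := by
    intro l
    induction l with
    | nil => intro b; rfl
    | cons x xs ihx =>
      intro b
      rw [List.foldl_cons, pv_cl_nil, pvInnerA_zero k hk s.toList hcs _ x [] b rfl]
      exact ihx b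
  exact hgen _ 0

lemma pvB_zero (k : Int) (hk : k ≤ 0) (cs : List Char)
    (hcs : ∀ c ∈ cs, 71 ≤ c.toNat ∧ c.toNat ≤ 122) :
    ∀ r, r ≤ cs.length →
      (List.range r).foldl (pvStepB k cs) (List.replicate 26 0, 0, 0)
        = (pvCl (pvSeg (cs.map pvE) 0 r), 0, 0) := by
  intro r
  induction r with
  | zero => rw [pvSeg_empty _ 0 0 le_rfl, ← pv_cl_nil]; intro _; simp
  | succ r ihr =>
    intro hr1
    have hr : r < cs.length := by omega
    rw [List.range_succ, List.foldl_append, ihr (by omega)]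
    obtain ⟨h1r, h2r⟩ := hcs (cs[r]'hr) (cs.getElem_mem hr)
    have htr : (cs.map pvE)[r]'(by simpa using hr) = pvE (cs[r]'hr) := by simp
    have hsnoc : pvSeg (cs.map pvE) 0 (r + 1)
        = pvSeg (cs.map pvE) 0 r ++ [pvE (cs[r]'hr)] := by
      rw [pvSeg_snoc (cs.map pvE) 0 r (by omega) (by simpa using hr), htr]
    simp only [List.foldl_cons, List.foldl_nil, pvStepB, pv_getD_char cs r hr]
    rw [pv_setD_bridge _ (cs[r]'hr) h1r h2r, pv_getD_bridge _ (cs[r]'hr) h1r h2r,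
        pv_cl_snoc _ (pvE (cs[r]'hr)) (pvE_lt _), ← hsnoc]
    have hfuel : r + 1 - 0 = Nat.succ r := by omega
    rw [hfuel]
    simp only [pvShrink]
    rw [pv_getD_bridge _ (cs[r]'hr) h1r h2r]
    rw [if_neg (by
      rw [hsnoc, List.count_append]
      have h1 : (List.count (pvE (cs[r]'hr)) [pvE (cs[r]'hr)]) = 1 := by simp
      push_cast [h1]
      omega)]
    simp

-- ===== VERDICT (by name: the statement is the Claim_ definition above) =====
theorem numberOfSubstringsN2_spec : Claim_equal_numberOfSubstringsN2 := by
  intro s k _ hpre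
  unfold Spec_numberOfSubstringsN2
  have hcs : ∀ c ∈ s.toList, 71 ≤ c.toNat ∧ c.toNat ≤ 122 := by
    intro c hc
    have h := List.all_eq_true.1 hpre c hc
    simp only [Bool.and_eq_true, decide_eq_true_eq] at h
    exact h
  by_cases hk : 1 ≤ k
  · rw [pvA_total k hk s hcs]
    unfold numberOfSubstringsN2_alt
    obtain ⟨l, hfold, -, -, -⟩ := pvB_inv k hk s.toList hcs s.toList.length le_rfl
    show _ = (List.foldl (pvStepB k s.toList) (List.replicate 26 0, 0, 0)
      (List.range s.toList.length)).2.2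
    rw [hfold]
    simp only
    rw [show (∑ i ∈ Finset.range s.toList.length,
          (((List.range s.toList.length).countP
            (fun j => pvV k (s.toList.map pvE) i (j + 1)) : Nat) : Int))
        = ∑ i ∈ Finset.range s.toList.length, ∑ j ∈ Finset.range s.toList.length,
            (if pvV k (s.toList.map pvE) i (j + 1) then (1:Int) else 0) from
      Finset.sum_congr rfl fun i _ => pv_countP_int _ _]
    rw [show (∑ j ∈ Finset.range s.toList.length,
          (((List.range s.toList.length).countP
            (fun i => pvV k (s.toList.map pvE) i (j + 1)) : Nat) : Int))
        = ∑ j ∈ Finset.range s.toList.length, ∑ i ∈ Finset.range s.toList.length,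
            (if pvV k (s.toList.map pvE) i (j + 1) then (1:Int) else 0) from
      Finset.sum_congr rfl fun j _ => pv_countP_int _ _]
    exact Finset.sum_comm
  · push_neg at hk
    rw [pvA_zero k (by omega) s hcs]
    unfold numberOfSubstringsN2_alt
    show (0 : Int) = (List.foldl (pvStepB k s.toList) (List.replicate 26 0, 0, 0)
      (List.range s.toList.length)).2.2
    rw [pvB_zero k (by omega) s.toList hcs s.toList.length le_rfl]
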